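-- pv_equiv track=rewrite | github.com/Dean-Lin99/HAtools | defaultIMPORT.py | is_first_column_serial
-- ===== SOURCE A (Python) =====
-- def is_first_column_serial(col, min_length=5):
--     """
--     判斷第一欄是否為流水號（有一段連號即可），min_length可調整
--     """
--     numbers = []
--     for val in col:
--         try:
--             v = int(str(val).strip())
--             numbers.append(v)
--         except:
--             numbers.append(None)
--     max_streak = 0
--     streak = 0
--     prev = None
--     for n in numbers:
--         if n is not None and (prev is None or n == prev + 1):
--             streak += 1
--         else:
--             streak = 1 if n is not None else 0
--         prev = n
--         max_streak = max(max_streak, streak)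
--     return max_streak >= min_length
-- ===== SOURCE B (Python) =====
-- def is_first_column_serial(col, min_length=5):
--     """
--     判斷第一欄是否為流水號（有一段連號即可），min_length可調整
--     Grouping re-implementation: key each parseable cell by index - value;
--     a maximal block of contiguous equal keys is exactly a run of consecutive
--     serial numbers.  Return whether the longest such block reaches min_length.
--     """
--     keys = []
--     for i, val in enumerate(col):
--         try:
--             keys.append(i - int(str(val).strip()))
--         except Exception:
--             keys.append(None)
--     runs = []
--     total = len(keys)
--     j = 0
--     while j < total:
--         k = keys[j]
--         j += 1
--         if k is None:
--             continue
--         n = 1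
--         while j < total and keys[j] == k:
--             n += 1
--             j += 1
--         runs.append(n)
--     return max(runs, default=0) >= min_length
-- ===== Notes on version B (the rewrite author's own statement) =====
-- stated objective: alternative
-- what changed: Instead of A's stateful streak scan (prev/streak/max_streak updated per element), B keys each parseable cell by index - value and groups contiguous equal keys with a span loop, taking the maximum group length; unparseable cells get a None key that can never form a group.
import Mathlib
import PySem

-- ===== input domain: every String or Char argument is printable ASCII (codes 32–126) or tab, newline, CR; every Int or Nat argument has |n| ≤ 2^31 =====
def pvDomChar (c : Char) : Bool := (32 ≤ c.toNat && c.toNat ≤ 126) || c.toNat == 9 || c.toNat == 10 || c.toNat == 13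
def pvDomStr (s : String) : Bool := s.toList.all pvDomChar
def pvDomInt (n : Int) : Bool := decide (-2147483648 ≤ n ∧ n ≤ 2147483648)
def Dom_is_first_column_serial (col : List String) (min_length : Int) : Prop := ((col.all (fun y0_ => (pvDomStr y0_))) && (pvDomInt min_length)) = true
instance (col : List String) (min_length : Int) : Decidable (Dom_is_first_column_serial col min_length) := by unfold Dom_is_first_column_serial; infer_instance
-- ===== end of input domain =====

-- B replaces A's stateful streak scan by keying each parseable cell with (index - value) and
-- taking the longest contiguous block of equal keys (objective: alternative structure, same cost).

-- ===== PORT A =====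
-- numbers = [int(str(val).strip()) or None for val in col]  (the try/except loop)
def pvParseA : List String → List (Option Int)
  | [] => []
  | v :: rest => PySem.Int.ofStr? (PySem.Str.strip v) :: pvParseA rest

-- the streak loop: state (max_streak, streak, prev)
def pvLoopA : List (Option Int) → Int × Int × Option Int → Int
  | [], (ms, _, _) => ms
  | n :: rest, (ms, s, prev) =>
      let s' : Int :=
        if n.isSome ∧ (prev = none ∨ n = prev.map (· + 1)) then s + 1
        else if n.isSome then 1 else 0
      pvLoopA rest (max ms s', s', n)

def is_first_column_serial (col : List String) (min_length : Int) : Bool :=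
  decide (min_length ≤ pvLoopA (pvParseA col) (0, 0, none))

-- ===== PORT B =====
-- keys = [i - int(str(val).strip()) or None for i, val in enumerate(col)]
def pvBuildKeys : List String → Int → List (Option Int)
  | [], _ => []
  | v :: rest, i =>
      (match PySem.Int.ofStr? (PySem.Str.strip v) with
       | some x => some (i - x)
       | none => none) :: pvBuildKeys rest (i + 1)

-- inner while: count contiguous keys equal to k (n already counted), return count and remainder
def pvCountRun (k : Int) : List (Option Int) → Int → Int × List (Option Int)
  | x :: xs, n => if x = some k then pvCountRun k xs (n + 1) else (n, x :: xs)
  | [], n => (n, [])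

theorem pvCountRun_len (k : Int) : ∀ (xs : List (Option Int)) (n : Int),
    (pvCountRun k xs n).2.length ≤ xs.length := by
  intro xs
  induction xs with
  | nil => intro n; simp [pvCountRun]
  | cons x xs ih =>
      intro n
      simp only [pvCountRun]
      split
      · exact le_trans (ih (n + 1)) (by simp)
      · simp

-- outer while: collect the run lengths, keeping only the running best (max(runs, default=0))
def pvBestRun : List (Option Int) → Int → Int
  | [], best => best
  | none :: rest, best => pvBestRun rest best
  | some k :: rest, best =>
      let p := pvCountRun k rest 1
      pvBestRun p.2 (max best p.1)
termination_by l => l.length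
decreasing_by
  · simp
  · exact Nat.lt_succ_of_le (pvCountRun_len k rest 1)

def is_first_column_serial_alt (col : List String) (min_length : Int) : Bool :=
  decide (min_length ≤ pvBestRun (pvBuildKeys col 0) 0)

-- ===== PRECONDITION & SPEC =====
def Spec_is_first_column_serial (col : List String) (min_length : Int) (out : Bool) : Prop := out = is_first_column_serial_alt col min_length
instance (col : List String) (min_length : Int) (out : Bool) : Decidable (Spec_is_first_column_serial col min_length out) := by unfold Spec_is_first_column_serial; infer_instance

-- ===== CLAIM (what is proved, stated in full; the proofs are below) =====
def Claim_equal_is_first_column_serial : Prop := ∀ (col : List String) (min_length : Int), Dom_is_first_column_serial col min_length → Spec_is_first_column_serial col min_length (is_first_column_serial col min_length)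

-- ===== LEMMAS AND PROOFS =====

-- numbers-side mirror of pvCountRun: consume while head = some (v + n)
def pvTakeRunN (v : Int) : List (Option Int) → Int → Int × List (Option Int)
  | x :: xs, n => if x = some (v + n) then pvTakeRunN v xs (n + 1) else (n, x :: xs)
  | [], n => (n, [])

theorem pvTakeRunN_ge (v : Int) : ∀ (xs : List (Option Int)) (n : Int),
    n ≤ (pvTakeRunN v xs n).1 := by
  intro xs
  induction xs with
  | nil => intro n; simp [pvTakeRunN]
  | cons x xs ih =>
      intro n
      simp only [pvTakeRunN]
      split
      · exact le_trans (by omega) (ih (n + 1))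
      · simp

theorem pvTakeRunN_len (v : Int) : ∀ (xs : List (Option Int)) (n : Int),
    (pvTakeRunN v xs n).2.length ≤ xs.length := by
  intro xs
  induction xs with
  | nil => intro n; simp [pvTakeRunN]
  | cons x xs ih =>
      intro n
      simp only [pvTakeRunN]
      split
      · exact le_trans (ih (n + 1)) (by simp)
      · simp

-- numbers-side mirror of pvBestRun
def pvBestRunN : List (Option Int) → Int → Int
  | [], best => best
  | none :: rest, best => pvBestRunN rest best
  | some v :: rest, best =>
      let p := pvTakeRunN v rest 1
      pvBestRunN p.2 (max best p.1)
termination_by l => l.length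
decreasing_by
  · simp
  · exact Nat.lt_succ_of_le (pvTakeRunN_len v rest 1)

-- keys of a parsed column, directly from the numbers
def pvKeysOf : Int → List (Option Int) → List (Option Int)
  | _, [] => []
  | i, none :: ns => none :: pvKeysOf (i + 1) ns
  | i, some v :: ns => some (i - v) :: pvKeysOf (i + 1) ns

theorem pvBuildKeys_eq : ∀ (col : List String) (i : Int),
    pvBuildKeys col i = pvKeysOf i (pvParseA col) := by
  intro col
  induction col with
  | nil => intro i; simp [pvBuildKeys, pvParseA, pvKeysOf]
  | cons v rest ih =>
      intro i
      simp only [pvBuildKeys, pvParseA]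
      cases PySem.Int.ofStr? (PySem.Str.strip v) <;> simp [pvKeysOf, ih]

theorem pvCountRun_keysOf : ∀ (ns : List (Option Int)) (j k n : Int),
    pvCountRun k (pvKeysOf j ns) n =
      ((pvTakeRunN (j - k - n) ns n).1,
       pvKeysOf (j - n + (pvTakeRunN (j - k - n) ns n).1) (pvTakeRunN (j - k - n) ns n).2) := by
  intro ns
  induction ns with
  | nil =>
      intro j k n
      simp [pvKeysOf, pvCountRun, pvTakeRunN]
  | cons x xs ih =>
      intro j k n
      cases x with
      | none =>
          simp only [pvKeysOf, pvCountRun, pvTakeRunN]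
          have h1 : (none : Option Int) ≠ some k := by simp
          have h2 : (none : Option Int) ≠ some (j - k - n + n) := by simp
          simp only [if_neg h1, if_neg h2, show j - n + n = j from by omega]
          simp [pvKeysOf]
      | some w =>
          by_cases hw : w = j - k
          · subst hw
            simp only [pvKeysOf, pvCountRun, pvTakeRunN]
            have h1 : some (j - (j - k)) = some k := by congr 1; omega
            have h2 : some (j - k) = some (j - k - n + n) := by congr 1; omega
            simp only [if_pos h1, if_pos h2]
            have := ih (j + 1) k (n + 1)
            have harg : j + 1 - k - (n + 1) = j - k - n := by omega
            rw [harg] at this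
            rw [this, show j + 1 - (n + 1) = j - n from by omega]
          · simp only [pvKeysOf, pvCountRun, pvTakeRunN]
            have h1 : some (j - w) ≠ some k := by
              intro h; exact hw (by injection h with h; omega)
            have h2 : some w ≠ some (j - k - n + n) := by
              intro h; exact hw (by injection h with h; omega)
            simp only [if_neg h1, if_neg h2, show j - n + n = j from by omega]
            simp [pvKeysOf]

theorem pvBestRun_keysOf_aux : ∀ (fuel : Nat) (ns : List (Option Int)), ns.length ≤ fuel →
    ∀ (j b : Int), pvBestRun (pvKeysOf j ns) b = pvBestRunN ns b := by
  intro fuel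
  induction fuel with
  | zero =>
      intro ns hlen j b
      have : ns = [] := List.length_eq_zero_iff.mp (Nat.le_zero.mp hlen)
      subst this
      simp [pvKeysOf, pvBestRun, pvBestRunN]
  | succ m ih =>
      intro ns hlen j b
      match ns with
      | [] => simp [pvKeysOf, pvBestRun, pvBestRunN]
      | none :: rest =>
          simp only [pvKeysOf, pvBestRun, pvBestRunN]
          exact ih rest (by simpa using Nat.lt_succ_iff.mp (by simpa using hlen)) (j + 1) b
      | some v :: rest =>
          simp only [pvKeysOf, pvBestRun, pvBestRunN]
          have hc := pvCountRun_keysOf rest (j + 1) (j - v) 1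
          have harg : j + 1 - (j - v) - 1 = v := by omega
          rw [harg] at hc
          rw [hc]
          have hlen' : (pvTakeRunN v rest 1).2.length ≤ m := by
            have := pvTakeRunN_len v rest 1
            simp at hlen
            omega
          exact ih _ hlen' (j + 1 - 1 + (pvTakeRunN v rest 1).1) (max b (pvTakeRunN v rest 1).1)

theorem pvBestRun_keysOf (ns : List (Option Int)) (j b : Int) :
    pvBestRun (pvKeysOf j ns) b = pvBestRunN ns b :=
  pvBestRun_keysOf_aux ns.length ns le_rfl j b

-- the heart: A's streak fold equals the run-grouping maximum
theorem pvLoopA_eq : ∀ (ns : List (Option Int)),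
    (∀ ms : Int, 0 ≤ ms → pvLoopA ns (ms, 0, none) = pvBestRunN ns ms) ∧
    (∀ ms s p : Int, 1 ≤ s → s ≤ ms →
      pvLoopA ns (ms, s, some p) =
        pvBestRunN (pvTakeRunN (p + 1 - s) ns s).2 (max ms (pvTakeRunN (p + 1 - s) ns s).1)) := by
  intro ns
  induction ns with
  | nil =>
      constructor
      · intro ms _; simp [pvLoopA, pvBestRunN]
      · intro ms s p h1 h2
        simp only [pvLoopA, pvTakeRunN, pvBestRunN]
        omega
  | cons n xs ih =>
      obtain ⟨ih0, ihr⟩ := ih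
      constructor
      · intro ms hms
        cases n with
        | none =>
            rw [show pvLoopA (none :: xs) (ms, 0, none)
                  = pvLoopA xs (max ms 0, 0, none) from rfl]
            rw [show max ms (0:Int) = ms from by omega, ih0 ms hms]
            simp [pvBestRunN]
        | some w =>
            rw [show pvLoopA (some w :: xs) (ms, 0, none)
                  = pvLoopA xs (max ms (0 + 1), 0 + 1, some w) from rfl]
            have := ihr (max ms (0 + 1)) (0 + 1) w (by omega) (by omega)
            rw [show w + 1 - (0 + 1) = w from by omega] at this
            rw [this]
            simp only [pvBestRunN, show (0:Int) + 1 = 1 from rfl]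
            congr 1
            have hge := pvTakeRunN_ge w xs 1
            omega
      · intro ms s p h1 h2
        cases n with
        | none =>
            rw [show pvLoopA (none :: xs) (ms, s, some p)
                  = pvLoopA xs (max ms 0, 0, none) from rfl]
            rw [show max ms (0:Int) = ms from by omega, ih0 ms (by omega)]
            rw [show pvTakeRunN (p + 1 - s) (none :: xs) s = (s, none :: xs) from rfl]
            rw [show max ms s = ms from by omega]
            simp [pvBestRunN]
        | some w =>
            by_cases hw : w = p + 1
            · -- run continues
              have hc : (some w).isSome = true ∧
                  ((some p : Option Int) = none ∨ some w = (some p).map (· + 1)) :=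
                ⟨rfl, Or.inr (by subst hw; rfl)⟩
              simp only [pvLoopA]
              rw [if_pos hc]
              subst hw
              have := ihr (max ms (s + 1)) (s + 1) (p + 1) (by omega) (by omega)
              rw [show p + 1 + 1 - (s + 1) = p + 1 - s from by omega] at this
              rw [this]
              conv_rhs =>
                rw [pvTakeRunN, if_pos (show some (p + 1) = some (p + 1 - s + s) from by
                  congr 1; omega)]
              congr 1
              have hge := pvTakeRunN_ge (p + 1 - s) xs (s + 1)
              omega
            · -- run breaks: new run of length 1 at w
              have hc : ¬ ((some w).isSome = true ∧
                  ((some p : Option Int) = none ∨ some w = (some p).map (· + 1))) := by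
                rintro ⟨-, hor⟩
                rcases hor with hn | hm
                · exact Option.some_ne_none p hn
                · exact hw (by simpa using hm)
              simp only [pvLoopA]
              rw [if_neg hc, if_pos (show (some w).isSome = true from rfl)]
              have := ihr (max ms 1) 1 w (by omega) (by omega)
              rw [show w + 1 - 1 = w from by omega] at this
              rw [show max ms 1 = ms from by omega] at this ⊢
              rw [this]
              conv_rhs =>
                rw [pvTakeRunN, if_neg (show ¬ some w = some (p + 1 - s + s) from by
                  intro hh; exact hw (by injection hh with hh; omega))]
              rw [show max ms s = ms from by omega]
              simp only [pvBestRunN]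

-- ===== VERDICT (by name: the statement is the Claim_ definition above) =====
theorem is_first_column_serial_spec : Claim_equal_is_first_column_serial := by
  intro col min_length _
  unfold Spec_is_first_column_serial is_first_column_serial is_first_column_serial_alt
  rw [pvBuildKeys_eq, pvBestRun_keysOf, (pvLoopA_eq (pvParseA col)).1 0 le_rfl]
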